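-- pv_equiv track=rewrite | github.com/israelimade/OT-AI-Workshops | ot_report_generator.py | parse_notes
-- ===== SOURCE A (Python) =====
-- SECTION_KEYS = {
--     "presenting": "PRESENTING_CONCERNS",
--     "history": "HISTORY",
--     "observations": "OBSERVATIONS",
--     "functional": "FUNCTIONAL",
--     "cognitive": "COGNITIVE",
--     "environment": "ENVIRONMENT",
--     "risks": "RISKS",
--     "reasoning": "REASONING",
--     "recommendations": "RECOMMENDATIONS",
--     "goals": "GOALS",
--     "plan": "PLAN",
-- }
--
-- def parse_notes(raw: str) -> dict:
--     """
--     Very simple parser: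
--     Lines like 'presenting: ...' map to the template section 'PRESENTING_CONCERNS'.
--     Everything else is ignored. This keeps privacy and governance simple.
--     """
--     data = {v: "" for v in SECTION_KEYS.values()}
--     for line in raw.splitlines():
--         line = line.strip()
--         if not line or ":" not in line:
--             continue
--         key, val = line.split(":", 1)
--         key = key.strip().lower()
--         val = val.strip()
--         mapped = SECTION_KEYS.get(key)
--         if mapped:
--             # Preserve bullet feel if multiple lines per section
--             if data[mapped]:
--                 data[mapped] += "\n- " + val
--             else:
--                 data[mapped] = "- " + val if val else ""
--     return data
-- ===== SOURCE B (Python) =====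
-- SECTION_KEYS = {
--     "presenting": "PRESENTING_CONCERNS",
--     "history": "HISTORY",
--     "observations": "OBSERVATIONS",
--     "functional": "FUNCTIONAL",
--     "cognitive": "COGNITIVE",
--     "environment": "ENVIRONMENT",
--     "risks": "RISKS",
--     "reasoning": "REASONING",
--     "recommendations": "RECOMMENDATIONS",
--     "goals": "GOALS",
--     "plan": "PLAN",
-- }
--
-- def parse_notes(raw: str) -> dict:
--     # Group the stripped values per section first, then render each section
--     # in one join instead of growing the string conditionally per line.
--     groups = {}
--     for line in raw.splitlines():
--         line = line.strip()
--         if not line or ":" not in line: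
--             continue
--         key, val = line.split(":", 1)
--         mapped = SECTION_KEYS.get(key.strip().lower())
--         if mapped:
--             groups.setdefault(mapped, []).append(val.strip())
--     data = {v: "" for v in SECTION_KEYS.values()}
--     for sec, vals in groups.items():
--         while vals and not vals[0]:
--             vals.pop(0)
--         if vals:
--             data[sec] = "- " + "\n- ".join(vals)
--     return data
-- ===== Notes on version B (the rewrite author's own statement) =====
-- stated objective: alternative
-- what changed: Replaces A's stateful fold that grows each section string with per-line conditionals by a group-then-render decomposition: stripped values are first grouped per section, then each section is rendered in one join after dropping its leading empty values.
import Mathlib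
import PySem

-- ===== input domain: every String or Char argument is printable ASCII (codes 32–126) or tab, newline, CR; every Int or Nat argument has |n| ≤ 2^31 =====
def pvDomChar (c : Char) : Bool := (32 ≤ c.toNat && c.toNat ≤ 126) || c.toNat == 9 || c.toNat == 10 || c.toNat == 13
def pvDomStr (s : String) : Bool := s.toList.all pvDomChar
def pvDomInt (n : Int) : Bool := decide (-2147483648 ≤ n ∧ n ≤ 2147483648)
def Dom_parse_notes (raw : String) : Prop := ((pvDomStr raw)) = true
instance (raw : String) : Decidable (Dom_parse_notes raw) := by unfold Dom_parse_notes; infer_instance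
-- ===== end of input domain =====

-- B groups the stripped values per section first and renders each section with one
-- join (after dropping leading empty values) instead of A's per-line conditional
-- string growing; same cost, different decomposition ("alternative").

-- ===== PORT A =====
-- SECTION_KEYS as an insertion-ordered dict over List Char (strings are ported on the list side)
def pnSections : List (List Char × List Char) := [
  ("presenting".toList, "PRESENTING_CONCERNS".toList),
  ("history".toList, "HISTORY".toList),
  ("observations".toList, "OBSERVATIONS".toList),
  ("functional".toList, "FUNCTIONAL".toList),
  ("cognitive".toList, "COGNITIVE".toList),
  ("environment".toList, "ENVIRONMENT".toList),
  ("risks".toList, "RISKS".toList),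
  ("reasoning".toList, "REASONING".toList),
  ("recommendations".toList, "RECOMMENDATIONS".toList),
  ("goals".toList, "GOALS".toList),
  ("plan".toList, "PLAN".toList)]

def pnSectionDict : PySem.Dict (List Char) (List Char) := ⟨pnSections⟩

-- SECTION_KEYS.values()
def pnVals : List (List Char) := pnSections.map (·.2)

-- the body of A's for-loop (one line processed against the data dict)
def pnStepA (d : PySem.Dict (List Char) (List Char)) (rawLine : List Char) :
    PySem.Dict (List Char) (List Char) :=
  let line := PySem.Chars.strip rawLine
  if line = [] ∨ PySem.Chars.isIn [':'] line = false then d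
  else match PySem.Chars.splitOnMax line [':'] 1 with
    | [k0, v0] =>
      let key := PySem.Chars.lower (PySem.Chars.strip k0)
      let val := PySem.Chars.strip v0
      match pnSectionDict.get? key with
      | none => d
      | some mapped =>
        if mapped = [] then d    -- "if mapped:" — falsey for None (handled above) and ""
        else if d.getD mapped [] ≠ [] then
          d.insert mapped (d.getD mapped [] ++ ('\n' :: '-' :: ' ' :: val))
        else
          d.insert mapped (if val ≠ [] then '-' :: ' ' :: val else [])
    | _ => d   -- unreachable: split(":",1) with ":" in line yields exactly two parts

-- data = {v: "" for v in SECTION_KEYS.values()}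
def pnInitA : PySem.Dict (List Char) (List Char) :=
  pnVals.foldl (fun d v => d.insert v []) ⟨[]⟩

def parse_notes (raw : String) : List (String × String) :=
  ((PySem.Chars.splitlines raw.toList).foldl pnStepA pnInitA).items.map
    (fun p => (String.ofList p.1, String.ofList p.2))

-- ===== PORT B =====
-- the body of B's first loop: group the stripped value under its mapped section
def pnStepB (g : PySem.Dict (List Char) (List (List Char))) (rawLine : List Char) :
    PySem.Dict (List Char) (List (List Char)) :=
  let line := PySem.Chars.strip rawLine
  if line = [] ∨ PySem.Chars.isIn [':'] line = false then g
  else match PySem.Chars.splitOnMax line [':'] 1 with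
    | [k0, v0] =>
      let key := PySem.Chars.lower (PySem.Chars.strip k0)
      let val := PySem.Chars.strip v0
      match pnSectionDict.get? key with
      | none => g
      | some mapped =>
        if mapped = [] then g
        else g.modify mapped [] (· ++ [val])   -- groups.setdefault(mapped, []).append(val)
    | _ => g

-- the body of B's second loop: drop leading empty values, then one join
def pnRenderStep (d : PySem.Dict (List Char) (List Char))
    (p : List Char × List (List Char)) : PySem.Dict (List Char) (List Char) :=
  let vals := p.2.dropWhile (fun v => v == [])   -- while vals and not vals[0]: vals.pop(0)
  if vals ≠ [] then
    d.insert p.1 ('-' :: ' ' :: PySem.Chars.join ('\n' :: '-' :: ' ' :: []) vals)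
  else d

def parse_notes_alt (raw : String) : List (String × String) :=
  let groups := (PySem.Chars.splitlines raw.toList).foldl pnStepB ⟨[]⟩
  let data0 : PySem.Dict (List Char) (List Char) := pnVals.foldl (fun d v => d.insert v []) ⟨[]⟩
  (groups.items.foldl pnRenderStep data0).items.map
    (fun p => (String.ofList p.1, String.ofList p.2))

-- ===== PRECONDITION & SPEC =====
def Spec_parse_notes (raw : String) (out : List (String × String)) : Prop := out = parse_notes_alt raw
instance (raw : String) (out : List (String × String)) : Decidable (Spec_parse_notes raw out) := by unfold Spec_parse_notes; infer_instance

-- ===== CLAIM (what is proved, stated in full; the proofs are below) =====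
def Claim_equal_parse_notes : Prop := ∀ (raw : String), Dom_parse_notes raw → Spec_parse_notes raw (parse_notes raw)

-- ===== LEMMAS AND PROOFS =====

-- what one section's accumulated value list renders to
def pnRender (vs : List (List Char)) : List Char :=
  let t := vs.dropWhile (fun v => v == [])
  if t = [] then [] else '-' :: ' ' :: PySem.Chars.join ('\n' :: '-' :: ' ' :: []) t

theorem pnJoin_append (sep : List Char) (l : List (List Char)) (u : List Char) (hl : l ≠ []) :
    PySem.Chars.join sep (l ++ [u]) = PySem.Chars.join sep l ++ sep ++ u := by
  induction l with
  | nil => exact absurd rfl hl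
  | cons x t ih =>
    cases t with
    | nil => simp [PySem.Chars.join, List.intercalate]
    | cons y s =>
      have h2 := ih (by simp)
      simp only [PySem.Chars.join, List.intercalate, List.cons_append, List.intersperse_cons₂,
        List.flatten_cons] at h2 ⊢
      rw [h2]; simp

theorem pnRender_append (vs : List (List Char)) (u : List Char) :
    pnRender (vs ++ [u]) =
      if pnRender vs ≠ [] then pnRender vs ++ ('\n' :: '-' :: ' ' :: u)
      else (if u ≠ [] then '-' :: ' ' :: u else []) := by
  unfold pnRender
  rw [List.dropWhile_append]
  cases hd : List.dropWhile (fun v => v == ([] : List Char)) vs with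
  | nil =>
    simp only [List.isEmpty_nil, if_true, List.dropWhile]
    by_cases hu : u = []
    · simp [hu]
    · have h0 : u.isEmpty = false := by simpa using hu
      simp [hu, h0, PySem.Chars.join, List.intercalate]
  | cons x t =>
    simp only [List.isEmpty_cons, if_false, Bool.false_eq_true]
    have hne : x :: t ≠ [] := by simp
    rw [pnJoin_append _ _ _ hne]
    simp

theorem dict_contains_iff {V : Type} (d : PySem.Dict (List Char) V) (k : List Char) :
    d.contains k = true ↔ k ∈ d.keys := by
  simp only [PySem.Dict.contains, PySem.Dict.keys, List.any_eq_true, List.mem_map, beq_iff_eq]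


theorem dict_keys_insert {V : Type} (d : PySem.Dict (List Char) V) (k : List Char) (v : V) :
    (d.insert k v).keys = if d.contains k = true then d.keys else d.keys ++ [k] := by
  by_cases h : d.contains k = true
  · simp only [PySem.Dict.insert, h, if_true, PySem.Dict.keys, List.map_map]
    apply List.map_congr_left
    intro p _
    by_cases hp : p.1 = k <;> simp [hp]
  · simp [PySem.Dict.insert, h, PySem.Dict.keys]

theorem dict_getD_map {V : Type} (ks : List (List Char)) (f : List Char → V)
    (m : List Char) (hm : m ∈ ks) (d0 : V) :
    (PySem.Dict.mk (ks.map fun v => (v, f v))).getD m d0 = f m := by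
  induction ks with
  | nil => cases hm
  | cons a t ih =>
    by_cases ha : a = m
    · subst ha; simp [PySem.Dict.getD, PySem.Dict.get?]
    · rcases List.mem_cons.mp hm with hm1 | hm1
      · exact absurd hm1.symm ha
      · have := ih hm1
        simpa [PySem.Dict.getD, PySem.Dict.get?, ha, Ne.symm ha] using this

theorem dict_insert_map {V : Type} (ks : List (List Char)) (f : List Char → V)
    (m : List Char) (hm : m ∈ ks) (w : V) :
    (PySem.Dict.mk (ks.map fun v => (v, f v))).insert m w =
      ⟨ks.map fun v => (v, if v = m then w else f v)⟩ := by
  have hc : (PySem.Dict.mk (ks.map fun v => (v, f v))).contains m = true := by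
    rw [dict_contains_iff]
    simp only [PySem.Dict.keys, List.map_map]
    exact List.mem_map.mpr ⟨m, hm, rfl⟩
  simp only [PySem.Dict.insert, hc, if_true]
  apply PySem.Dict.ext
  simp only [List.map_map]
  apply List.map_congr_left
  intro v _
  by_cases hv : v = m <;> simp [hv]

theorem pnGet_mem (key m : List Char) (h : pnSectionDict.get? key = some m) :
    m ∈ pnVals ∧ m ≠ [] := by
  simp only [PySem.Dict.get?, Option.map_eq_some_iff] at h
  obtain ⟨p, hp, hv⟩ := h
  have hmem : p ∈ pnSections := List.mem_of_find?_eq_some hp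
  have hall : ∀ q ∈ pnSections, q.2 ∈ pnVals ∧ q.2 ≠ [] := by decide
  exact hv ▸ hall p hmem

-- one line preserves the invariant relating A's data dict to B's groups dict
theorem pnStep_inv (g : PySem.Dict (List Char) (List (List Char))) (line : List Char) :
    pnStepA ⟨pnVals.map fun v => (v, pnRender (g.getD v []))⟩ line =
      ⟨pnVals.map fun v => (v, pnRender ((pnStepB g line).getD v []))⟩ := by
  simp only [pnStepA, pnStepB]
  by_cases h1 : PySem.Chars.strip line = [] ∨
      PySem.Chars.isIn [':'] (PySem.Chars.strip line) = false
  · rw [if_pos h1, if_pos h1]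
  · rw [if_neg h1, if_neg h1]
    cases hsp : PySem.Chars.splitOnMax (PySem.Chars.strip line) [':'] 1 with
    | nil => rfl
    | cons k0 rest =>
      cases rest with
      | nil => rfl
      | cons v0 rest2 =>
        cases rest2 with
        | cons a b => rfl
        | nil =>
          dsimp only
          cases hm : pnSectionDict.get? (PySem.Chars.lower (PySem.Chars.strip k0)) with
          | none => rfl
          | some m =>
            dsimp only
            obtain ⟨hmv, hmne⟩ := pnGet_mem _ _ hm
            rw [if_neg hmne, if_neg hmne]
            simp only [PySem.Dict.modify]
            rw [dict_getD_map pnVals _ m hmv]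
            by_cases hr : pnRender (g.getD m []) = []
            · rw [if_neg (by simp [hr])]
              rw [dict_insert_map pnVals _ m hmv]
              apply PySem.Dict.ext
              dsimp only
              apply List.map_congr_left
              intro v _
              by_cases hvm : v = m
              · subst hvm
                rw [PySem.Dict.getD_insert, if_pos rfl, if_pos rfl, pnRender_append]
                simp [hr]
              · rw [PySem.Dict.getD_insert, if_neg hvm, if_neg hvm]
            · rw [if_pos hr]
              rw [dict_insert_map pnVals _ m hmv]
              apply PySem.Dict.ext
              dsimp only
              apply List.map_congr_left
              intro v _
              by_cases hvm : v = m
              · subst hvm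
                rw [PySem.Dict.getD_insert, if_pos rfl, if_pos rfl, pnRender_append]
                simp [hr]
              · rw [PySem.Dict.getD_insert, if_neg hvm, if_neg hvm]

theorem pnStepB_keys (g : PySem.Dict (List Char) (List (List Char))) (line : List Char)
    (hsub : ∀ k ∈ g.keys, k ∈ pnVals) (hnd : g.keys.Nodup) :
    (∀ k ∈ (pnStepB g line).keys, k ∈ pnVals) ∧ (pnStepB g line).keys.Nodup := by
  simp only [pnStepB]
  by_cases h1 : PySem.Chars.strip line = [] ∨
      PySem.Chars.isIn [':'] (PySem.Chars.strip line) = false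
  · rw [if_pos h1]; exact ⟨hsub, hnd⟩
  · rw [if_neg h1]
    cases hsp : PySem.Chars.splitOnMax (PySem.Chars.strip line) [':'] 1 with
    | nil => exact ⟨hsub, hnd⟩
    | cons k0 rest =>
      cases rest with
      | nil => exact ⟨hsub, hnd⟩
      | cons v0 rest2 =>
        cases rest2 with
        | cons a b => exact ⟨hsub, hnd⟩
        | nil =>
          dsimp only
          cases hm : pnSectionDict.get? (PySem.Chars.lower (PySem.Chars.strip k0)) with
          | none => exact ⟨hsub, hnd⟩
          | some m =>
            dsimp only
            obtain ⟨hmv, hmne⟩ := pnGet_mem _ _ hm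
            rw [if_neg hmne]
            simp only [PySem.Dict.modify]
            rw [dict_keys_insert]
            by_cases hc : g.contains m = true
            · rw [if_pos hc]; exact ⟨hsub, hnd⟩
            · rw [if_neg hc]
              refine ⟨?_, ?_⟩
              · intro k hk
                rcases List.mem_append.mp hk with h | h
                · exact hsub k h
                · rwa [List.mem_singleton.mp h]
              · rw [List.nodup_append]
                refine ⟨hnd, List.nodup_singleton m, ?_⟩
                intro k hk b hb he
                rw [List.mem_singleton] at hb
                exact hc ((dict_contains_iff g m).mpr ((he.trans hb) ▸ hk))

theorem pnFold_inv (L : List (List Char)) :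
    L.foldl pnStepA pnInitA =
        ⟨pnVals.map fun v => (v, pnRender ((L.foldl pnStepB ⟨[]⟩).getD v []))⟩ ∧
      (∀ k ∈ (L.foldl pnStepB ⟨[]⟩).keys, k ∈ pnVals) ∧ (L.foldl pnStepB ⟨[]⟩).keys.Nodup := by
  induction L using List.reverseRecOn with
  | nil =>
    refine ⟨?_, by simp [PySem.Dict.keys], by simp [PySem.Dict.keys]⟩
    apply PySem.Dict.ext
    decide
  | append_singleton L line ih =>
    obtain ⟨hA, hsub, hnd⟩ := ih
    simp only [List.foldl_append, List.foldl_cons, List.foldl_nil]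
    refine ⟨?_, (pnStepB_keys _ line hsub hnd).1, (pnStepB_keys _ line hsub hnd).2⟩
    rw [hA]
    exact pnStep_inv _ line

-- second pass of B: the value every processed pair leaves at its key
def pnApply : List (List Char × List (List Char)) → (List Char → List Char) → List Char → List Char
  | [], f => f
  | p :: ps, f =>
    pnApply ps (fun v => if v = p.1 then
      (if p.2.dropWhile (fun w => w == []) ≠ []
       then '-' :: ' ' :: PySem.Chars.join ('\n' :: '-' :: ' ' :: []) (p.2.dropWhile (fun w => w == []))
       else f v) else f v)

theorem pnApply_congr (ps : List (List Char × List (List Char)))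
    (f f' : List Char → List Char) (v : List Char) (h : f v = f' v) :
    pnApply ps f v = pnApply ps f' v := by
  induction ps generalizing f f' with
  | nil => exact h
  | cons p ps ih =>
    refine ih _ _ ?_
    by_cases hv : v = p.1
    · subst hv
      rw [if_pos rfl, if_pos rfl]
      split <;> [rfl; exact h]
    · rw [if_neg hv, if_neg hv]; exact h

theorem pnApply_not_mem (ps : List (List Char × List (List Char)))
    (f : List Char → List Char) (v : List Char) (h : v ∉ ps.map (·.1)) :
    pnApply ps f v = f v := by
  induction ps generalizing f with
  | nil => rfl
  | cons p ps ih =>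
    simp only [List.map_cons, List.mem_cons, not_or] at h
    rw [pnApply, ih _ h.2]
    simp [h.1]

theorem pnApply_render (ps : List (List Char × List (List Char)))
    (hnd : (ps.map (·.1)).Nodup) (v : List Char) :
    pnApply ps (fun _ => []) v = pnRender ((PySem.Dict.mk ps).getD v []) := by
  induction ps with
  | nil => simp [pnApply, PySem.Dict.getD, PySem.Dict.get?, pnRender]
  | cons p ps ih =>
    simp only [List.map_cons, List.nodup_cons] at hnd
    by_cases hv : v = p.1
    · rw [pnApply, pnApply_not_mem _ _ _ (hv ▸ hnd.1)]
      have hg : (PySem.Dict.mk (p :: ps)).getD v [] = p.2 := by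
        simp [PySem.Dict.getD, PySem.Dict.get?, hv]
      rw [hg, if_pos hv]
      unfold pnRender
      by_cases h2 : List.dropWhile (fun w => w == ([] : List Char)) p.2 = []
      · rw [if_neg (not_not_intro h2), if_pos h2]
      · rw [if_pos h2, if_neg h2]
    · rw [pnApply]
      have hg : (PySem.Dict.mk (p :: ps)).getD v [] = (PySem.Dict.mk ps).getD v [] := by
        simp [PySem.Dict.getD, PySem.Dict.get?, Ne.symm hv]
      rw [hg, ← ih hnd.2]
      exact pnApply_congr _ _ _ _ (by simp [hv])

theorem pnFold2 (ps : List (List Char × List (List Char))) (f : List Char → List Char)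
    (hsub : ∀ p ∈ ps, p.1 ∈ pnVals) :
    ps.foldl pnRenderStep ⟨pnVals.map fun v => (v, f v)⟩ =
      ⟨pnVals.map fun v => (v, pnApply ps f v)⟩ := by
  induction ps generalizing f with
  | nil => rfl
  | cons p ps ih =>
    simp only [List.foldl_cons, pnApply]
    have hmem : p.1 ∈ pnVals := hsub p (List.mem_cons_self ..)
    have hsub' : ∀ q ∈ ps, q.1 ∈ pnVals := fun q hq => hsub q (List.mem_cons_of_mem _ hq)
    by_cases hv : p.2.dropWhile (fun w => w == []) = []
    · have hstep : pnRenderStep ⟨pnVals.map fun v => (v, f v)⟩ p =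
          ⟨pnVals.map fun v => (v, f v)⟩ := by
        simp only [pnRenderStep]
        rw [if_neg (not_not_intro hv)]
      rw [hstep, ih _ hsub']
      apply PySem.Dict.ext
      dsimp only
      apply List.map_congr_left
      intro v _
      refine congrArg _ (pnApply_congr _ _ _ _ ?_)
      by_cases hvm : v = p.1
      · rw [if_pos hvm, if_neg (not_not_intro hv)]
      · rw [if_neg hvm]
    · have hstep : pnRenderStep ⟨pnVals.map fun v => (v, f v)⟩ p =
          ⟨pnVals.map fun v => (v, if v = p.1
            then '-' :: ' ' :: PySem.Chars.join ('\n' :: '-' :: ' ' :: []) (p.2.dropWhile (fun w => w == []))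
            else f v)⟩ := by
        simp only [pnRenderStep]
        rw [if_pos hv]
        exact dict_insert_map pnVals f p.1 hmem _
      rw [hstep, ih _ hsub']
      apply PySem.Dict.ext
      dsimp only
      apply List.map_congr_left
      intro v _
      refine congrArg _ (pnApply_congr _ _ _ _ ?_)
      by_cases hvm : v = p.1
      · rw [if_pos hvm, if_pos hvm, if_pos hv]
      · rw [if_neg hvm, if_neg hvm]

-- ===== VERDICT (by name: the statement is the Claim_ definition above) =====
theorem parse_notes_spec : Claim_equal_parse_notes := by
  intro raw _
  unfold Spec_parse_notes
  simp only [parse_notes, parse_notes_alt]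
  obtain ⟨hA, hsub, hnd⟩ := pnFold_inv (PySem.Chars.splitlines raw.toList)
  set g := (PySem.Chars.splitlines raw.toList).foldl pnStepB ⟨[]⟩ with hg
  have hinit : (pnVals.foldl (fun d v => d.insert v []) ⟨[]⟩ : PySem.Dict (List Char) (List Char)) =
      ⟨pnVals.map fun v => (v, (fun _ => ([] : List Char)) v)⟩ := by
    apply PySem.Dict.ext; decide
  have hsub' : ∀ p ∈ g.items, p.1 ∈ pnVals := by
    intro p hp
    exact hsub p.1 (List.mem_map.mpr ⟨p, hp, rfl⟩)
  have hnd' : (g.items.map (·.1)).Nodup := hnd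
  rw [hA, hinit, pnFold2 g.items _ hsub']
  congr 1
  dsimp only
  apply List.map_congr_left
  intro v _
  rw [pnApply_render g.items hnd' v]
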